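-- pv_equiv track=rewrite | github.com/or-mihai-or-gheorghe/CS-Foundations-Tools | tools/logic_kmap_sop.py | implicant_to_term
-- ===== SOURCE A (Python) =====
-- from typing import List, Tuple, Dict, Set, Optional
--
-- def implicant_to_term(minset: Set[int], nvars: int, var_order: List[str]) -> str:
--     """
--     For a set of minterms, find literals that don't change across the set
--     (0 → var', 1 → var). Output product term like A·B'·D.
--     """
--     if not minset:
--         return "1"
--     # Build per-variable bit consistency
--     bits_by_var = [set() for _ in range(nvars)]
--     for m in minset:
--         for i in range(nvars):
--             bit = (m >> (nvars-1-i)) & 1  # MSB var_order[0]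
--             bits_by_var[i].add(bit)
--     lits = []
--     for i,var in enumerate(var_order[:nvars]):
--         vals = bits_by_var[i]
--         if vals == {0}:
--             lits.append(f"{var}'")
--         elif vals == {1}:
--             lits.append(f"{var}")
--         else:
--             # eliminates this variable
--             pass
--     if not lits:
--         return "1"
--     return "·".join(lits)
-- ===== SOURCE B (Python) =====
-- def implicant_to_term(minset, nvars, var_order):
--     """
--     For a set of minterms, find literals that don't change across the set
--     (0 -> var', 1 -> var). Output product term like A.B'.D.
--     """
--     if not minset:
--         return "1"
--     # One pass: AND-all and OR-all of the minterms
--     acc_and = -1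
--     acc_or = 0
--     for m in minset:
--         acc_and &= m
--         acc_or |= m
--     lits = []
--     for i, var in enumerate(var_order[:nvars]):
--         shift = nvars - 1 - i
--         if (acc_or >> shift) & 1 == 0:
--             lits.append(var + "'")
--         elif (acc_and >> shift) & 1 == 1:
--             lits.append(var)
--     if not lits:
--         return "1"
--     return "·".join(lits)
-- ===== Notes on version B (the rewrite author's own statement) =====
-- stated objective: faster
-- what changed: Replaces the per-variable sets built by an O(|minset|*nvars) nested loop with a single pass folding bitwise AND and OR over the minterms, then classifies each variable by one bit test on the two accumulators.
import Mathlib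
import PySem

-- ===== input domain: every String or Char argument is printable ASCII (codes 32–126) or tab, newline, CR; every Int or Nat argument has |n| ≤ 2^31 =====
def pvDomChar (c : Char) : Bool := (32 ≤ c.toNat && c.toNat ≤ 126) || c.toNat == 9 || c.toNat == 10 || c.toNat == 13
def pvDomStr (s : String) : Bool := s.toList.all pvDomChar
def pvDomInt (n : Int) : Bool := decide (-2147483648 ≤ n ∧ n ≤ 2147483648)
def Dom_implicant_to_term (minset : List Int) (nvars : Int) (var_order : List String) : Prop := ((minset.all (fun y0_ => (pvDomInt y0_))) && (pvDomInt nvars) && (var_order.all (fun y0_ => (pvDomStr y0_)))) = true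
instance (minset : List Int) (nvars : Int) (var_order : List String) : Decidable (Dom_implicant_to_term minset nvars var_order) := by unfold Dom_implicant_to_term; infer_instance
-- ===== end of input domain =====

-- B replaces A's per-variable bit sets (nested O(|minset|*nvars) loop) by one pass folding
-- bitwise AND and OR over the minterms, then classifies each variable with one bit test each.


-- ===== PORT A =====
def implicant_to_term (minset : List Int) (nvars : Int) (var_order : List String) : String :=
  if minset = [] then "1"
  else
    let bits_by_var : List (PySem.Set Int) :=
      (PySem.List.pyRange 0 nvars 1).map (fun _ => PySem.Set.empty)
    let bits_by_var :=
      minset.foldl (fun (bv : List (PySem.Set Int)) (m : Int) =>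
        (PySem.List.pyRange 0 nvars 1).foldl (fun bv i =>
          let bit : Int := PySem.Int.band (m >>> (nvars - 1 - i).toNat) 1
          PySem.List.pySetD bv i (PySem.Set.add (PySem.List.pyGetD bv i PySem.Set.empty) bit)) bv)
        bits_by_var
    let lits :=
      (PySem.List.enumerate (PySem.List.slice var_order none (some nvars)) 0).foldl
        (fun lits p =>
          let vals := PySem.List.pyGetD bits_by_var p.1 PySem.Set.empty
          if PySem.Set.equal vals (PySem.Set.ofList [(0 : Int)]) then lits ++ [p.2 ++ "'"]
          else if PySem.Set.equal vals (PySem.Set.ofList [(1 : Int)]) then lits ++ [p.2]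
          else lits) []
    if lits = [] then "1" else PySem.Str.join "·" lits

-- ===== PORT B =====
def implicant_to_term_alt (minset : List Int) (nvars : Int) (var_order : List String) : String :=
  if minset = [] then "1"
  else
    let acc : Int × Int :=
      minset.foldl (fun ac m => (PySem.Int.band ac.1 m, PySem.Int.bor ac.2 m)) (-1, 0)
    let lits :=
      (PySem.List.enumerate (PySem.List.slice var_order none (some nvars)) 0).foldl
        (fun lits p =>
          let shift := (nvars - 1 - p.1).toNat
          if PySem.Int.band (acc.2 >>> shift) 1 = 0 then lits ++ [p.2 ++ "'"]
          else if PySem.Int.band (acc.1 >>> shift) 1 = 1 then lits ++ [p.2]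
          else lits) []
    if lits = [] then "1" else PySem.Str.join "·" lits

-- ===== PRECONDITION & SPEC =====
-- Pre_ excludes exactly the inputs (nvars < 0, nonempty minset, and more than -nvars variable
-- names) on which Python A raises IndexError (bits_by_var is empty there); B raises there too.
def Pre_implicant_to_term (minset : List Int) (nvars : Int) (var_order : List String) : Prop :=
  0 ≤ nvars ∨ minset = [] ∨ (var_order.length : Int) + nvars ≤ 0
instance (minset : List Int) (nvars : Int) (var_order : List String) : Decidable (Pre_implicant_to_term minset nvars var_order) := by unfold Pre_implicant_to_term; infer_instance

def pvWitness_implicant_to_term : List Int × Int × List String := ([1, 3], 2, ["A", "B"])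

def Spec_implicant_to_term (minset : List Int) (nvars : Int) (var_order : List String) (out : String) : Prop := out = implicant_to_term_alt minset nvars var_order
instance (minset : List Int) (nvars : Int) (var_order : List String) (out : String) : Decidable (Spec_implicant_to_term minset nvars var_order out) := by unfold Spec_implicant_to_term; infer_instance

-- ===== CLAIM (what is proved, stated in full; the proofs are below) =====
def Claim_equal_implicant_to_term : Prop := ∀ (minset : List Int) (nvars : Int) (var_order : List String), Dom_implicant_to_term minset nvars var_order → Pre_implicant_to_term minset nvars var_order → Spec_implicant_to_term minset nvars var_order (implicant_to_term minset nvars var_order)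

-- ===== LEMMAS AND PROOFS =====

theorem pv_xor_eq_add : ∀ x : Nat, ∀ y : Nat, x &&& y = 0 → x ^^^ y = x + y := by
  intro x
  induction x using Nat.strong_induction_on with
  | _ x ih =>
    intro y h
    rcases Nat.eq_zero_or_pos x with hx | hx
    · simp [hx]
    · have h2 : (x / 2) &&& (y / 2) = 0 := by rw [← Nat.and_div_two, h]
      have ihx := ih (x / 2) (by omega) (y / 2) h2
      have t0 := congrArg (fun z => Nat.testBit z 0) h
      simp [Nat.testBit_zero] at t0
      have tx := Nat.testBit_xor x y 0
      simp [Nat.testBit_zero] at tx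
      have e1 : (x ^^^ y) / 2 = x / 2 + y / 2 := by rw [Nat.xor_div_two, ihx]
      have e2 : (x ^^^ y) % 2 = x % 2 + y % 2 := by
        rcases Nat.mod_two_eq_zero_or_one x with h' | h' <;>
          rcases Nat.mod_two_eq_zero_or_one y with h'' | h'' <;>
            simp [h', h''] at tx t0 ⊢ <;> omega
      omega

theorem pv_ldiff_eq_sub (p n : Nat) : Nat.ldiff p n = p - (p &&& n) := by
  have hxor : Nat.ldiff p n = p ^^^ (p &&& n) := by
    apply Nat.eq_of_testBit_eq
    intro i
    simp [Nat.testBit_ldiff, Nat.testBit_xor, Nat.testBit_and]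
    cases Nat.testBit p i <;> cases Nat.testBit n i <;> simp
  have hdisj : (p ^^^ (p &&& n)) &&& (p &&& n) = 0 := by
    apply Nat.eq_of_testBit_eq
    intro i
    simp [Nat.testBit_xor, Nat.testBit_and]
    cases Nat.testBit p i <;> cases Nat.testBit n i <;> simp
  have hcancel : (p ^^^ (p &&& n)) ^^^ (p &&& n) = p := Nat.xor_xor_cancel_right _ _
  have := pv_xor_eq_add _ _ hdisj
  rw [this] at hcancel
  omega

theorem pv_band_eq_land (a b : Int) : PySem.Int.band a b = Int.land a b := by
  rcases a with m | m <;> rcases b with n | n <;>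
    simp [PySem.Int.band, Int.land, Int.negSucc_eq, pv_ldiff_eq_sub] <;> omega

theorem pv_bor_eq_lor (a b : Int) : PySem.Int.bor a b = Int.lor a b := by
  rcases a with m | m <;> rcases b with n | n <;>
    simp [PySem.Int.bor, Int.lor, Int.negSucc_eq, pv_ldiff_eq_sub] <;> omega

theorem pv_bit (x : Int) (s : Nat) : PySem.Int.band (x >>> s) 1 = if x.testBit s then 1 else 0 := by
  rcases x with m | m
  · rw [show (Int.ofNat m) >>> s = ((m >>> s : Nat) : Int) from rfl]
    rw [show (1 : Int) = ((1 : Nat) : Int) from rfl, PySem.Int.band_natCast]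
    rw [Nat.and_one_is_mod]
    rw [show (Int.ofNat m).testBit s = (m >>> s).testBit 0 from by
      simp [Int.testBit]]
    rw [Nat.testBit_zero]
    generalize (m >>> s) = k
    rcases Nat.mod_two_eq_zero_or_one k with h | h <;> simp [h]
  · rw [Int.negSucc_shiftRight]
    have h1 : PySem.Int.band (Int.negSucc (m >>> s)) 1 = ((1 - (1 &&& (m >>> s)) : Nat) : Int) := by
      generalize (m >>> s) = k
      unfold PySem.Int.band
      rw [Int.negSucc_eq]
      rw [if_neg (by omega : ¬ (0:Int) ≤ -((k:Int) + 1)), if_pos (by norm_num : (0:Int) ≤ 1)]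
      have hk : (- -((k:Int) + 1) - 1).toNat = k := by omega
      rw [hk]
      norm_num
    rw [h1, Nat.and_comm, Nat.and_one_is_mod]
    rw [show (Int.negSucc m).testBit s = !(m >>> s).testBit 0 from by
      simp [Int.testBit]]
    rw [Nat.testBit_zero]
    generalize (m >>> s) = k
    rcases Nat.mod_two_eq_zero_or_one k with h | h <;> simp [h]

theorem pv_testBit_bor (a b : Int) (s : Nat) :
    (PySem.Int.bor a b).testBit s = (a.testBit s || b.testBit s) := by
  rw [pv_bor_eq_lor]; exact Int.testBit_lor a b s

theorem pv_testBit_band (a b : Int) (s : Nat) :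
    (PySem.Int.band a b).testBit s = (a.testBit s && b.testBit s) := by
  rw [pv_band_eq_land]; exact Int.testBit_land a b s

theorem pv_fold_bor (ms : List Int) (s : Nat) :
    ∀ acc : Int, (ms.foldl PySem.Int.bor acc).testBit s
      = (acc.testBit s || ms.any (fun m => m.testBit s)) := by
  induction ms with
  | nil => simp
  | cons m ms ih =>
    intro acc
    simp only [List.foldl_cons, List.any_cons, ih, pv_testBit_bor]
    cases acc.testBit s <;> cases m.testBit s <;> simp

theorem pv_fold_band (ms : List Int) (s : Nat) :
    ∀ acc : Int, (ms.foldl PySem.Int.band acc).testBit s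
      = (acc.testBit s && ms.all (fun m => m.testBit s)) := by
  induction ms with
  | nil => simp
  | cons m ms ih =>
    intro acc
    simp only [List.foldl_cons, List.all_cons, ih, pv_testBit_band]
    cases acc.testBit s <;> cases m.testBit s <;> simp

theorem pv_testBit_neg_one (s : Nat) : (-1 : Int).testBit s = true := by
  rw [show (-1 : Int) = Int.negSucc 0 from rfl]
  simp [Int.testBit]

theorem pv_testBit_zero_int (s : Nat) : (0 : Int).testBit s = false := by
  rw [show (0 : Int) = Int.ofNat 0 from rfl]
  simp [Int.testBit]

theorem pv_inner {α : Type} (f : Nat → α → α) (d : α) :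
    ∀ (n : Nat) (bv : List α), n ≤ bv.length →
      (List.range n).foldl (fun bv k => bv.set k (f k (bv.getD k d))) bv
        = (List.range n).map (fun k => f k (bv.getD k d)) ++ bv.drop n := by
  intro n
  induction n with
  | zero => simp
  | succ n ih =>
    intro bv hlen
    rw [List.range_succ, List.foldl_append, List.map_append, ih bv (by omega)]
    have hn : n < bv.length := by omega
    have hdrop : bv.drop n = bv[n] :: bv.drop (n + 1) := by
      rw [List.drop_eq_getElem_cons hn]
    have hmaplen : ((List.range n).map (fun k => f k (bv.getD k d))).length = n := by simp
    have hgetD : ((List.range n).map (fun k => f k (bv.getD k d)) ++ bv.drop n).getD n d = bv.getD n d := by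
      rw [hdrop]
      rw [List.getD_eq_getElem?_getD, List.getElem?_append_right (by omega)]
      simp [List.getD_eq_getElem?_getD, hn]
    have hset : ((List.range n).map (fun k => f k (bv.getD k d)) ++ bv.drop n).set n (f n (bv.getD n d))
        = (List.range n).map (fun k => f k (bv.getD k d)) ++ [f n (bv.getD n d)] ++ bv.drop (n + 1) := by
      rw [List.set_append_right _ _ (by omega), hmaplen, Nat.sub_self, hdrop]
      simp
      rw [hdrop]
      rfl
    simp only [List.foldl_cons, List.foldl_nil, hgetD, hset]
    simp

theorem pv_outer (bitf : Int → Nat → Int) (N : Nat) :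
    ∀ (ms : List Int) (S : Nat → PySem.Set Int),
      ms.foldl (fun bv m =>
          (List.range N).foldl (fun bv k =>
            bv.set k (PySem.Set.add (bv.getD k PySem.Set.empty) (bitf m k))) bv)
        ((List.range N).map S)
      = (List.range N).map (fun k => ms.foldl (fun s m => PySem.Set.add s (bitf m k)) (S k)) := by
  intro ms
  induction ms with
  | nil => intro S; simp
  | cons m ms ih =>
    intro S
    simp only [List.foldl_cons]
    have hlen : N ≤ ((List.range N).map S).length := by simp
    rw [pv_inner (fun k v => PySem.Set.add v (bitf m k)) PySem.Set.empty N _ hlen]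
    have hdrop : ((List.range N).map S).drop N = [] := by simp
    have hgd : ∀ k ∈ List.range N, ((List.range N).map S).getD k PySem.Set.empty = S k := by
      intro k hk
      simp at hk
      rw [List.getD_eq_getElem?_getD]
      simp [hk]
    rw [hdrop, List.append_nil]
    rw [List.map_congr_left (fun k hk => by rw [hgd k hk])]
    exact ih (fun k => PySem.Set.add (S k) (bitf m k))

theorem pv_bits (minset : List Int) (nvars : Int) :
    minset.foldl (fun (bv : List (PySem.Set Int)) (m : Int) =>
        (PySem.List.pyRange 0 nvars 1).foldl (fun bv i =>
          PySem.List.pySetD bv i (PySem.Set.add (PySem.List.pyGetD bv i PySem.Set.empty)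
            (PySem.Int.band (m >>> (nvars - 1 - i).toNat) 1))) bv)
      ((PySem.List.pyRange 0 nvars 1).map (fun _ => PySem.Set.empty))
    = (List.range nvars.toNat).map (fun (k : Nat) =>
        PySem.Set.ofList (minset.map (fun (m : Int) =>
          PySem.Int.band (m >>> (nvars - 1 - (k : Int)).toNat) 1))) := by
  have hr : PySem.List.pyRange 0 nvars 1 = List.map (fun (k : Nat) => (k : Int)) (List.range nvars.toNat) := by
    rw [PySem.List.pyRange_one]
    simp
  rw [hr]

  have hconv : ∀ (m : Int) (bv : List (PySem.Set Int)),
      (List.map (fun (k : Nat) => (k : Int)) (List.range nvars.toNat)).foldl (fun bv i =>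
        PySem.List.pySetD bv i (PySem.Set.add (PySem.List.pyGetD bv i PySem.Set.empty)
          (PySem.Int.band (m >>> (nvars - 1 - i).toNat) 1))) bv
      = (List.range nvars.toNat).foldl (fun bv k =>
          bv.set k (PySem.Set.add (bv.getD k PySem.Set.empty)
            (PySem.Int.band (m >>> (nvars - 1 - (k : Int)).toNat) 1))) bv := by
    intro m bv
    rw [List.foldl_map]
    apply PySem.List.foldl_congr_mem
    intro acc k _
    rw [PySem.List.pySetD_natCast, PySem.List.pyGetD_natCast]
  rw [List.map_map]
  rw [PySem.List.foldl_congr_mem _ _ _ _ (fun acc m _ => hconv m acc)]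
  rw [pv_outer (fun m k => PySem.Int.band (m >>> (nvars - 1 - (k : Int)).toNat) 1) nvars.toNat minset ((fun _ => PySem.Set.empty) ∘ (fun (k : Nat) => (k : Int)))]
  apply List.map_congr_left
  intro k _
  rw [PySem.Set.ofList_eq_foldl, List.foldl_map]
  rfl

theorem pv_equal_val (ms : List Int) (hne : ms ≠ []) (s : Nat) (v : Int) (hv : v = 0 ∨ v = 1) :
    (PySem.Set.equal
        (PySem.Set.ofList (ms.map (fun (m : Int) => PySem.Int.band (m >>> s) 1)))
        (PySem.Set.ofList [v]) = true)
      ↔ ∀ m ∈ ms, (if m.testBit s then (1 : Int) else 0) = v := by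
  have hmap : ms.map (fun (m : Int) => PySem.Int.band (m >>> s) 1)
      = ms.map (fun (m : Int) => if m.testBit s then (1 : Int) else 0) :=
    List.map_congr_left (fun m _ => pv_bit m s)
  rw [hmap, PySem.Set.equal_iff]
  constructor
  · intro h m hm
    have hmem : (if m.testBit s then (1 : Int) else 0) ∈ PySem.Set.ofList (ms.map (fun (m : Int) => if m.testBit s then (1 : Int) else 0)) := by
      rw [PySem.Set.mem_ofList]
      exact List.mem_map_of_mem hm
    have := (h _).mp hmem
    rw [PySem.Set.mem_ofList, List.mem_singleton] at this
    exact this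
  · intro h x
    rw [PySem.Set.mem_ofList, PySem.Set.mem_ofList, List.mem_singleton]
    constructor
    · intro hx
      rcases List.mem_map.mp hx with ⟨m, hm, rfl⟩
      exact h m hm
    · intro hx
      rcases List.exists_mem_of_ne_nil ms hne with ⟨m0, hm0⟩
      subst hx
      rw [← h m0 hm0]
      exact List.mem_map_of_mem hm0

theorem pv_slice_nil {α : Type} (xs : List α) (b : Int) (hb : b < 0)
    (hlen : (xs.length : Int) + b ≤ 0) : PySem.List.slice xs none (some b) = [] := by
  have hk : b = -(((-b).toNat : Nat) : Int) := by omega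
  rw [hk, PySem.List.slice_to_neg_natCast xs (-b).toNat (by omega)]
  have : xs.length - (-b).toNat = 0 := by omega
  rw [this, List.take_zero]

theorem implicant_to_term_spec : Claim_equal_implicant_to_term := by
  intro minset nvars var_order hdom hpre
  show implicant_to_term minset nvars var_order = implicant_to_term_alt minset nvars var_order
  by_cases hms : minset = []
  · simp [implicant_to_term, implicant_to_term_alt, hms]
  · by_cases hnv : 0 ≤ nvars
    · simp only [implicant_to_term, implicant_to_term_alt, if_neg hms]
      rw [pv_bits minset nvars]
      rw [PySem.List.foldl_prod_mk PySem.Int.band PySem.Int.bor minset (-1) 0]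
      have hl : ∀ acc : List String, ∀ p ∈ PySem.List.enumerate (PySem.List.slice var_order none (some nvars)) 0,
          (fun lits (p : Int × String) =>
            if PySem.Set.equal (PySem.List.pyGetD ((List.range nvars.toNat).map (fun (k : Nat) =>
                  PySem.Set.ofList (minset.map (fun (m : Int) =>
                    PySem.Int.band (m >>> (nvars - 1 - (k : Int)).toNat) 1)))) p.1 PySem.Set.empty)
                (PySem.Set.ofList [(0 : Int)]) then acc ++ [p.2 ++ "'"]
            else if PySem.Set.equal (PySem.List.pyGetD ((List.range nvars.toNat).map (fun (k : Nat) =>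
                  PySem.Set.ofList (minset.map (fun (m : Int) =>
                    PySem.Int.band (m >>> (nvars - 1 - (k : Int)).toNat) 1)))) p.1 PySem.Set.empty)
                (PySem.Set.ofList [(1 : Int)]) then acc ++ [p.2]
            else acc) acc p
          = (fun lits (p : Int × String) =>
            if PySem.Int.band ((minset.foldl PySem.Int.bor 0) >>> (nvars - 1 - p.1).toNat) 1 = 0 then acc ++ [p.2 ++ "'"]
            else if PySem.Int.band ((minset.foldl PySem.Int.band (-1)) >>> (nvars - 1 - p.1).toNat) 1 = 1 then acc ++ [p.2]
            else acc) acc p := by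
        intro acc p hp
        rcases (PySem.List.mem_enumerate_iff _ _ _).mp hp with ⟨k, hk, rfl⟩
        rw [PySem.List.slice_to var_order hnv] at hk
        have hkN : k < nvars.toNat := by
          have := List.length_take_le nvars.toNat var_order
          omega
        simp only [zero_add]
        have hget : PySem.List.pyGetD ((List.range nvars.toNat).map (fun (k : Nat) =>
              PySem.Set.ofList (minset.map (fun (m : Int) =>
                PySem.Int.band (m >>> (nvars - 1 - (k : Int)).toNat) 1)))) (k : Int) PySem.Set.empty
            = PySem.Set.ofList (minset.map (fun (m : Int) =>
                PySem.Int.band (m >>> (nvars - 1 - (k : Int)).toNat) 1)) := by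
          rw [PySem.List.pyGetD_natCast, List.getD_eq_getElem?_getD]
          simp [hkN]
        rw [hget]
        have hb : ∀ b : Bool, ((if b then (1:Int) else 0) = 0 ↔ b = false) := by decide
        have hb1 : ∀ b : Bool, ((if b then (1:Int) else 0) = 1 ↔ b = true) := by decide
        have h0 : (PySem.Set.equal (PySem.Set.ofList (minset.map (fun (m : Int) =>
              PySem.Int.band (m >>> (nvars - 1 - (k : Int)).toNat) 1))) (PySem.Set.ofList [(0 : Int)]) = true)
            ↔ (PySem.Int.band ((minset.foldl PySem.Int.bor 0) >>> (nvars - 1 - (k : Int)).toNat) 1 = 0) := by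
          rw [pv_equal_val minset hms _ 0 (Or.inl rfl)]
          rw [pv_bit, pv_fold_bor, pv_testBit_zero_int]
          simp only [Bool.false_or, hb]
          simp [Bool.not_eq_true, List.any_eq_false]
        have h1 : (PySem.Set.equal (PySem.Set.ofList (minset.map (fun (m : Int) =>
              PySem.Int.band (m >>> (nvars - 1 - (k : Int)).toNat) 1))) (PySem.Set.ofList [(1 : Int)]) = true)
            ↔ (PySem.Int.band ((minset.foldl PySem.Int.band (-1)) >>> (nvars - 1 - (k : Int)).toNat) 1 = 1) := by
          rw [pv_equal_val minset hms _ 1 (Or.inr rfl)]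
          rw [pv_bit, pv_fold_band, pv_testBit_neg_one]
          simp only [Bool.true_and, hb1]
          exact (List.all_eq_true).symm
        rw [if_congr h0 rfl (if_congr h1 rfl rfl)]
      rw [PySem.List.foldl_congr_mem _ _ _ [] hl]
    · have hnv' : nvars < 0 := by omega
      have hlen : (var_order.length : Int) + nvars ≤ 0 := by
        rcases hpre with h | h | h
        · omega
        · exact absurd h hms
        · exact h
      have hsl : PySem.List.slice var_order none (some nvars) = [] :=
        pv_slice_nil var_order nvars hnv' hlen
      simp only [implicant_to_term, implicant_to_term_alt, if_neg hms, hsl]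
      rfl
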